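-- pv_equiv track=rewrite | github.com/JingyZhu/FidEx | fidex/fidelity_check/fidelity_impact.py | _get_dimem
-- ===== SOURCE A (Python) =====
-- def _get_dimem(dimensions, xpaths):
--     new_dimensions = {}
--     for xpath in xpaths:
--         if xpath in dimensions and dimensions[xpath]:
--             new_dimensions[xpath] = dimensions[xpath]
--             continue
--         paths = xpath.split('/')
--         for i in range(len(paths)-1, 0, -1):
--             parent = '/'.join(paths[:i])
--             if parent in dimensions and dimensions[parent]:
--                 new_dimensions[xpath] = dimensions[parent]
--                 break
--     return new_dimensions
-- ===== SOURCE B (Python) =====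
-- def _get_dimem(dimensions, xpaths):
--     def resolve(path):
--         dims = dimensions.get(path)
--         if dims:
--             return dims
--         i = path.rfind('/')
--         if i < 0:
--             return None
--         return resolve(path[:i])
--
--     new_dimensions = {}
--     for xpath in xpaths:
--         dims = resolve(xpath)
--         if dims:
--             new_dimensions[xpath] = dims
--     return new_dimensions
-- ===== Notes on version B (the rewrite author's own statement) =====
-- stated objective: simpler
-- what changed: A splits each xpath into segments and, for each candidate depth, re-joins a prefix of the segment list inside a descending index loop; B replaces the whole split/join machinery by a recursive resolve(path) that looks the path up and recurses on the text before the last '/' (rfind + slice), returning None when no '/' is left.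
import Mathlib
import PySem

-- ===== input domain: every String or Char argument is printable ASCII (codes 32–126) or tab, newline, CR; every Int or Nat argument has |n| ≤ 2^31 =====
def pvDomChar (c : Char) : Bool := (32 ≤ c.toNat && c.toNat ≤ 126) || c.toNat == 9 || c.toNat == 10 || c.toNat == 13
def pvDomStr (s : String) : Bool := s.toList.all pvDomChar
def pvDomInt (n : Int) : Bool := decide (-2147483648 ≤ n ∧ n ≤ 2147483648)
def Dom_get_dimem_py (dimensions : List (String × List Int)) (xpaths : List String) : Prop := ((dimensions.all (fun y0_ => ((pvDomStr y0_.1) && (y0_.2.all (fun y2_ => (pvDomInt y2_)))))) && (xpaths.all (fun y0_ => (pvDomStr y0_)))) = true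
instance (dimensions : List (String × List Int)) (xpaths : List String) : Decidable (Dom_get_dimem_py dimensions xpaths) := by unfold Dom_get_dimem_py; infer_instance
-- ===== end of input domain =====

-- B replaces A's per-xpath split('/') + descending '/'.join(paths[:i]) rescans by a recursive
-- resolve that walks up the ancestor chain directly via rfind('/') and a prefix slice (objective: simpler).

-- ===== PORT A =====
-- inner 'for i in range(len(paths)-1, 0, -1): … break' of A, threading the dict being built
def pvALoop (d nd : PySem.Dict String (List Int)) (xpath : String)
    (paths : List (List Char)) : List Int → PySem.Dict String (List Int)
  | [] => nd
  | i :: rest =>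
    -- parent = '/'.join(paths[:i])
    let parent := PySem.Chars.join ['/'] (PySem.List.slice paths none (some i))
    match d.get? (String.ofList parent) with
    | some v => if v ≠ [] then nd.insert xpath v else pvALoop d nd xpath paths rest
    | none => pvALoop d nd xpath paths rest

-- 'paths = xpath.split('/')' and the descending index loop
def pvAWalk (d nd : PySem.Dict String (List Int)) (xpath : String) : PySem.Dict String (List Int) :=
  let paths := PySem.Chars.splitOn xpath.toList ['/']
  pvALoop d nd xpath paths (PySem.List.pyRange ((paths.length : Int) - 1) 0 (-1))

-- one iteration of A's outer 'for xpath in xpaths'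
def pvAStep (d nd : PySem.Dict String (List Int)) (xpath : String) : PySem.Dict String (List Int) :=
  match d.get? xpath with        -- 'if xpath in dimensions and dimensions[xpath]:'
  | some v => if v ≠ [] then nd.insert xpath v else pvAWalk d nd xpath
  | none => pvAWalk d nd xpath

def get_dimem_py (dimensions : List (String × List Int)) (xpaths : List String) : List (String × List Int) :=
  (xpaths.foldl (fun nd xpath => pvAStep (PySem.Dict.mk dimensions) nd xpath)
    (PySem.Dict.empty : PySem.Dict String (List Int))).items

-- ===== PORT B =====
-- termination fact for pvResolve: a non-negative rfind result is a valid index, hence < length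
theorem pv_rfind_go_lt (s : List Char) : ∀ j : Nat,
    ¬ PySem.Chars.rfind.go s ['/'] j < 0 → (PySem.Chars.rfind.go s ['/'] j).toNat < s.length := by
  intro j
  induction j with
  | zero =>
    intro h
    by_cases hp : ['/'].isPrefixOf s = true
    · have hs : s ≠ [] := by intro hnil; rw [hnil] at hp; simp [List.isPrefixOf] at hp
      simp only [PySem.Chars.rfind.go, hp, if_true]
      cases s with
      | nil => exact absurd rfl hs
      | cons c t => simp
    · simp [PySem.Chars.rfind.go, hp] at h
  | succ j ih =>
    intro h
    by_cases hp : ['/'].isPrefixOf (s.drop (j + 1)) = true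
    · have hne : s.drop (j + 1) ≠ [] := by
        intro hnil; rw [hnil] at hp; simp [List.isPrefixOf] at hp
      have hlt : j + 1 < s.length := by
        by_contra hge
        exact hne (List.drop_eq_nil_iff.mpr (by omega))
      simp only [PySem.Chars.rfind.go, hp, if_true]
      simpa using hlt
    · have hrec : PySem.Chars.rfind.go s ['/'] (j+1) = PySem.Chars.rfind.go s ['/'] j := by
        rw [PySem.Chars.rfind.go]; simp [hp]
      rw [hrec] at h ⊢
      exact ih h

theorem pv_rfind_lt (cs : List Char) (h : ¬ PySem.Chars.rfind cs ['/'] < 0) :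
    (PySem.Chars.rfind cs ['/']).toNat < cs.length := pv_rfind_go_lt cs cs.length h

-- recursive resolve(path) of Source B: truthy self-lookup, else recurse on path[:path.rfind('/')]
def pvResolve (d : PySem.Dict String (List Int)) (cs : List Char) : Option (List Int) :=
  let dims := d.get? (String.ofList cs)        -- dims = dimensions.get(path)
  if (dims.getD []) ≠ [] then some (dims.getD [])   -- 'if dims: return dims'
  else
    let i := PySem.Chars.rfind cs ['/']        -- i = path.rfind('/')
    if h : i < 0 then none
    else pvResolve d (PySem.List.slice cs none (some i))   -- return resolve(path[:i])
termination_by cs.length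
decreasing_by
  rw [PySem.List.slice_to cs (by omega)]
  have := pv_rfind_lt cs h
  simp only [List.length_take]
  omega

def get_dimem_py_alt (dimensions : List (String × List Int)) (xpaths : List String) : List (String × List Int) :=
  let d := PySem.Dict.mk dimensions
  (xpaths.foldl (fun nd xpath =>
      match pvResolve d xpath.toList with
      | some v => nd.insert xpath v
      | none => nd)
    (PySem.Dict.empty : PySem.Dict String (List Int))).items

-- ===== PRECONDITION & SPEC =====
def Spec_get_dimem_py (dimensions : List (String × List Int)) (xpaths : List String) (out : List (String × List Int)) : Prop := out = get_dimem_py_alt dimensions xpaths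
instance (dimensions : List (String × List Int)) (xpaths : List String) (out : List (String × List Int)) : Decidable (Spec_get_dimem_py dimensions xpaths out) := by unfold Spec_get_dimem_py; infer_instance

-- ===== CLAIM (what is proved, stated in full; the proofs are below) =====
def Claim_equal_get_dimem_py : Prop := ∀ (dimensions : List (String × List Int)) (xpaths : List String), Dom_get_dimem_py dimensions xpaths → Spec_get_dimem_py dimensions xpaths (get_dimem_py dimensions xpaths)

-- ===== LEMMAS AND PROOFS =====

-- proof-side model of s.split('/')
def pvMSplit : List Char → List (List Char)
  | [] => [[]]
  | c :: rest => if c = '/' then [] :: pvMSplit rest else (pvMSplit rest).modifyHead (c :: ·)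

theorem pvMSplit_ne_nil (cs : List Char) : pvMSplit cs ≠ [] := by
  induction cs with
  | nil => simp [pvMSplit]
  | cons c rest ih =>
    simp only [pvMSplit]
    split
    · simp
    · cases h : pvMSplit rest with
      | nil => exact absurd h ih
      | cons a t => simp [List.modifyHead]

theorem pv_go_eq (l : List Char) : ∀ (fuel : Nat) (cur : List Char) (acc : List (List Char)),
    l.length ≤ fuel →
    PySem.Chars.splitOn.go ['/'] fuel l cur acc
      = acc.reverse ++ (pvMSplit l).modifyHead (cur.reverse ++ ·) := by
  induction l with
  | nil =>
    intro fuel cur acc _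
    cases fuel with
    | zero => simp [PySem.Chars.splitOn.go, pvMSplit, List.modifyHead]
    | succ f => simp [PySem.Chars.splitOn.go, pvMSplit, List.modifyHead]
  | cons c rest ih =>
    intro fuel cur acc hf
    cases fuel with
    | zero => simp at hf
    | succ f =>
      by_cases hc : c = '/'
      · subst hc
        have hp : ['/'].isPrefixOf ('/' :: rest) = true := by simp [List.isPrefixOf]
        rw [PySem.Chars.splitOn.go]
        simp only [hp, if_true, List.length_singleton, List.drop_succ_cons, List.drop_zero]
        rw [ih f [] ((cur.reverse) :: acc) (by simpa using hf)]
        simp [pvMSplit, List.modifyHead]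
        cases hrest : pvMSplit rest with
        | nil => exact absurd hrest (pvMSplit_ne_nil rest)
        | cons a t => simp [List.modifyHead]
      · have hp : ¬ (['/'].isPrefixOf (c :: rest) = true) := by
          simp [List.isPrefixOf]; intro hEq; exact hc hEq.symm
        rw [PySem.Chars.splitOn.go]
        simp only [hp, if_false]
        rw [ih f (c :: cur) acc (by simpa using hf)]
        simp only [pvMSplit, if_neg hc]
        cases hrest : pvMSplit rest with
        | nil => exact absurd hrest (pvMSplit_ne_nil rest)
        | cons a t => simp [List.modifyHead]

theorem pv_splitOn_eq (cs : List Char) : PySem.Chars.splitOn cs ['/'] = pvMSplit cs := by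
  rw [PySem.Chars.splitOn, pv_go_eq cs (cs.length + 1) [] [] (by omega)]
  cases hcs : pvMSplit cs with
  | nil => exact absurd hcs (pvMSplit_ne_nil cs)
  | cons a t => simp [List.modifyHead]

theorem pv_join_msplit (cs : List Char) : PySem.Chars.join ['/'] (pvMSplit cs) = cs := by
  induction cs with
  | nil => simp [pvMSplit, PySem.Chars.join_singleton]
  | cons c rest ih =>
    by_cases hc : c = '/'
    · subst hc
      rw [show pvMSplit ('/' :: rest) = [] :: pvMSplit rest from by simp [pvMSplit]]
      cases hrest : pvMSplit rest with
      | nil => exact absurd hrest (pvMSplit_ne_nil rest)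
      | cons a t =>
        rw [PySem.Chars.join_cons_cons]
        rw [hrest] at ih
        simp [ih]
    · simp only [pvMSplit, if_neg hc]
      cases hrest : pvMSplit rest with
      | nil => exact absurd hrest (pvMSplit_ne_nil rest)
      | cons a t =>
        rw [hrest] at ih
        cases t with
        | nil => simpa [List.modifyHead, PySem.Chars.join_singleton] using congrArg (c :: ·) ih
        | cons b t' =>
          simp only [List.modifyHead, PySem.Chars.join_cons_cons] at ih ⊢
          simpa using congrArg (c :: ·) ih

theorem pv_msplit_no_slash (cs : List Char) (h : '/' ∉ cs) : pvMSplit cs = [cs] := by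
  induction cs with
  | nil => rfl
  | cons c rest ih =>
    have hc : c ≠ '/' := fun hEq => h (by simp [hEq])
    have hrest : '/' ∉ rest := fun hm => h (List.mem_cons_of_mem _ hm)
    simp [pvMSplit, hc, ih hrest, List.modifyHead]

theorem pv_msplit_last (a b : List Char) (h : '/' ∉ b) :
    pvMSplit (a ++ '/' :: b) = pvMSplit a ++ [b] := by
  induction a with
  | nil => simp [pvMSplit, pv_msplit_no_slash b h]
  | cons c a' ih =>
    by_cases hc : c = '/'
    · subst hc; simp [pvMSplit, ih]
    · simp only [List.cons_append, pvMSplit, if_neg hc, ih]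
      cases ha' : pvMSplit a' with
      | nil => exact absurd ha' (pvMSplit_ne_nil a')
      | cons x t => simp [List.modifyHead]

theorem pv_decomp (cs : List Char) (h : '/' ∈ cs) :
    ∃ a b, cs = a ++ '/' :: b ∧ '/' ∉ b := by
  induction cs with
  | nil => simp at h
  | cons c rest ih =>
    by_cases hr : '/' ∈ rest
    · obtain ⟨a, b, hab, hb⟩ := ih hr
      exact ⟨c :: a, b, by simp [hab], hb⟩
    · have hc : c = '/' := by
        rcases List.mem_cons.mp h with h1 | h2
        · exact h1.symm
        · exact absurd h2 hr
      exact ⟨[], rest, by simp [hc], hr⟩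

theorem pv_rfind_go_no_slash (s : List Char) (h : '/' ∉ s) :
    ∀ j : Nat, PySem.Chars.rfind.go s ['/'] j = -1 := by
  have hpre : ∀ k : Nat, ¬ (['/'].isPrefixOf (s.drop k) = true) := by
    intro k hp
    cases hd : s.drop k with
    | nil => rw [hd] at hp; simp [List.isPrefixOf] at hp
    | cons x t =>
      rw [hd] at hp
      simp [List.isPrefixOf] at hp
      exact h (List.mem_of_mem_drop (by rw [hd]; simp [hp.symm]))
  intro j
  induction j with
  | zero =>
    have := hpre 0
    simp only [List.drop_zero] at this
    simp [PySem.Chars.rfind.go, this]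
  | succ j ih =>
    rw [PySem.Chars.rfind.go]
    simp [hpre (j+1), ih]

theorem pv_rfind_no_slash (cs : List Char) (h : '/' ∉ cs) : PySem.Chars.rfind cs ['/'] = -1 := by
  rw [PySem.Chars.rfind]
  exact pv_rfind_go_no_slash cs h cs.length

theorem pv_rfind_last (a b : List Char) (h : '/' ∉ b) :
    PySem.Chars.rfind (a ++ '/' :: b) ['/'] = (a.length : Int) := by
  have hgo : ∀ j : Nat, a.length ≤ j → j ≤ (a ++ '/' :: b).length →
      PySem.Chars.rfind.go (a ++ '/' :: b) ['/'] j = (a.length : Int) := by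
    intro j
    induction j with
    | zero =>
      intro h1 _
      have ha : a = [] := List.eq_nil_of_length_eq_zero (by omega)
      subst ha
      simp [PySem.Chars.rfind.go, List.isPrefixOf]
    | succ j ih =>
      intro h1 h2
      by_cases heq : j + 1 = a.length
      · have hd : (a ++ '/' :: b).drop (j + 1) = '/' :: b := by
          rw [heq, List.drop_append_of_le_length (le_refl _)]
          simp
        rw [PySem.Chars.rfind.go, hd]
        simp [List.isPrefixOf, heq]
      · have hgt : a.length < j + 1 := by omega
        have hd : (a ++ '/' :: b).drop (j + 1) = b.drop (j - a.length) := by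
          have h1 : j + 1 = a.length + (j + 1 - a.length) := by omega
          rw [h1, List.drop_append]
          have h2 : j + 1 - a.length = (j - a.length) + 1 := by omega
          rw [h2]
          simp
        have hp : ¬ (['/'].isPrefixOf ((a ++ '/' :: b).drop (j + 1)) = true) := by
          rw [hd]
          intro hp
          cases hdb : b.drop (j - a.length) with
          | nil => rw [hdb] at hp; simp [List.isPrefixOf] at hp
          | cons x t =>
            rw [hdb] at hp
            simp [List.isPrefixOf] at hp
            exact h (List.mem_of_mem_drop (by rw [hdb]; simp [hp.symm]))
        rw [PySem.Chars.rfind.go]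
        simp only [hp, if_false]
        exact ih (by omega) (by omega)
  rw [PySem.Chars.rfind]
  exact hgo (a ++ '/' :: b).length (by simp) (le_refl _)

-- value computed by A's inner loop (no dict threading)
def pvAVal (d : PySem.Dict String (List Int)) (paths : List (List Char)) : List Int → Option (List Int)
  | [] => none
  | i :: rest =>
    let parent := PySem.Chars.join ['/'] (PySem.List.slice paths none (some i))
    match d.get? (String.ofList parent) with
    | some v => if v ≠ [] then some v else pvAVal d paths rest
    | none => pvAVal d paths rest

theorem pvALoop_eq (d nd : PySem.Dict String (List Int)) (xpath : String)
    (paths : List (List Char)) (is : List Int) :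
    pvALoop d nd xpath paths is
      = match pvAVal d paths is with
        | some v => nd.insert xpath v
        | none => nd := by
  induction is with
  | nil => rfl
  | cons i rest ih =>
    simp only [pvALoop, pvAVal]
    cases (d.get? (String.ofList (PySem.Chars.join ['/'] (PySem.List.slice paths none (some i))))) with
    | some v =>
      by_cases hv : v ≠ []
      · simp [hv]
      · simp [hv, ih]
    | none => simpa using ih

theorem pvAVal_congr (d : PySem.Dict String (List Int)) (p1 p2 : List (List Char)) :
    ∀ is : List Int, (∀ i ∈ is, PySem.List.slice p1 none (some i) = PySem.List.slice p2 none (some i)) →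
    pvAVal d p1 is = pvAVal d p2 is := by
  intro is
  induction is with
  | nil => intro _; rfl
  | cons i rest ih =>
    intro hmem
    simp only [pvAVal, hmem i (by simp)]
    cases (d.get? (String.ofList (PySem.Chars.join ['/'] (PySem.List.slice p2 none (some i))))) with
    | some v =>
      by_cases hv : v ≠ []
      · simp [hv]
      · simp [hv, ih (fun i hi => hmem i (by simp [hi]))]
    | none => simpa using ih (fun i hi => hmem i (by simp [hi]))

-- A's full per-xpath resolution value
def pvAIn (d : PySem.Dict String (List Int)) (cs : List Char) : Option (List Int) :=
  pvAVal d (pvMSplit cs) (PySem.List.pyRange (((pvMSplit cs).length : Int) - 1) 0 (-1))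

theorem pvAIn_no_slash (d : PySem.Dict String (List Int)) (cs : List Char) (h : '/' ∉ cs) :
    pvAIn d cs = none := by
  unfold pvAIn
  rw [pv_msplit_no_slash cs h]
  norm_num
  rfl

theorem pv_noslash (d : PySem.Dict String (List Int)) (cs : List Char) (h : '/' ∉ cs) :
    pvResolve d cs
      = match d.get? (String.ofList cs) with
        | some v => if v ≠ [] then some v else none
        | none => none := by
  rw [pvResolve]
  simp only [pv_rfind_no_slash cs h]
  cases hget : d.get? (String.ofList cs) with
  | none => simp [hget]
  | some v =>
    by_cases hv : v ≠ []
    · simp [hget, hv]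
    · simp [hget, hv]

-- the heart: B's recursive resolve computes exactly A's self-check-then-inner-loop value
theorem pv_main (d : PySem.Dict String (List Int)) : ∀ (n : Nat) (cs : List Char), cs.length ≤ n →
    pvResolve d cs
      = match d.get? (String.ofList cs) with
        | some v => if v ≠ [] then some v else pvAIn d cs
        | none => pvAIn d cs := by
  intro n
  induction n with
  | zero =>
    intro cs hlen
    have hcs : cs = [] := List.eq_nil_of_length_eq_zero (by omega)
    subst hcs
    rw [pv_noslash d [] (by simp)]
    simp [pvAIn_no_slash d [] (by simp)]
  | succ m ih =>
    intro cs hlen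
    by_cases hs : '/' ∈ cs
    · obtain ⟨a, b, hab, hb⟩ := pv_decomp cs hs
      subst hab
      have hIH := ih a (by simp at hlen; omega)
      -- the value of A's inner loop over a ++ '/' :: b
      have hm0 : 0 < (pvMSplit a).length := List.length_pos_of_ne_nil (pvMSplit_ne_nil a)
      have hAIn : pvAIn d (a ++ '/' :: b)
          = match d.get? (String.ofList a) with
            | some v => if v ≠ [] then some v else pvAIn d a
            | none => pvAIn d a := by
        unfold pvAIn
        rw [pv_msplit_last a b hb]
        have hlen2 : (((pvMSplit a ++ [b]).length : Int) - 1) = ((pvMSplit a).length : Int) := by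
          simp [List.length_append]
        rw [hlen2]
        rw [PySem.List.pyRange_neg_one_cons (by exact_mod_cast hm0)]
        have hcong : pvAVal d (pvMSplit a ++ [b])
              (PySem.List.pyRange (((pvMSplit a).length : Int) - 1) 0 (-1))
            = pvAVal d (pvMSplit a)
              (PySem.List.pyRange (((pvMSplit a).length : Int) - 1) 0 (-1)) := by
          apply pvAVal_congr
          intro i hi
          obtain ⟨hi1, hi2⟩ := PySem.List.mem_pyRange_neg_one.mp hi
          rw [PySem.List.slice_to _ (le_of_lt hi1), PySem.List.slice_to _ (le_of_lt hi1)]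
          have hiN : (i.toNat : Int) = i := Int.toNat_of_nonneg (le_of_lt hi1)
          exact List.take_append_of_le_length (by omega)
        simp only [pvAVal, PySem.List.slice_to_natCast, List.take_left, pv_join_msplit, hcong]
      -- unfold one step of B's resolve
      rw [pvResolve]
      simp only [pv_rfind_last a b hb]
      rw [hAIn]
      cases hget : d.get? (String.ofList (a ++ '/' :: b)) with
      | none =>
        show (if ([] : List Int) ≠ [] then _ else _) = _
        rw [if_neg (by simp)]
        rw [dif_neg (by omega : ¬ ((a.length : Int) < 0))]
        rw [PySem.List.slice_to_natCast, List.take_left]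
        exact hIH
      | some v =>
        by_cases hv : v ≠ []
        · simp only [Option.getD_some, if_pos hv]
        · simp only [not_not] at hv
          subst hv
          show (if ([] : List Int) ≠ [] then _ else _) = _
          rw [if_neg (by simp)]
          rw [dif_neg (by omega : ¬ ((a.length : Int) < 0))]
          rw [PySem.List.slice_to_natCast, List.take_left]
          simp only [ne_eq, not_true_eq_false, if_false]
          exact hIH
    · rw [pv_noslash d cs hs]
      simp [pvAIn_no_slash d cs hs]

theorem pv_step_eq (d nd : PySem.Dict String (List Int)) (xpath : String) :
    pvAStep d nd xpath
      = match pvResolve d xpath.toList with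
        | some v => nd.insert xpath v
        | none => nd := by
  unfold pvAStep pvAWalk
  rw [pv_main d xpath.toList.length xpath.toList (le_refl _), String.ofList_toList]
  rw [pvALoop_eq, pv_splitOn_eq]
  show _ = match (match d.get? xpath with
      | some v => if v ≠ [] then some v else pvAIn d xpath.toList
      | none => pvAIn d xpath.toList) with
    | some v => nd.insert xpath v
    | none => nd
  cases hget : d.get? xpath with
  | none => rfl
  | some v =>
    by_cases hv : v ≠ []
    · simp only [if_pos hv]
    · simp only [if_neg hv]
      rfl

-- ===== VERDICT (by name: the statement is the Claim_ definition above) =====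
theorem get_dimem_py_spec : Claim_equal_get_dimem_py := by
  intro dimensions xpaths _
  unfold Spec_get_dimem_py get_dimem_py get_dimem_py_alt
  congr 1
  have hstep : (fun nd xpath => pvAStep (PySem.Dict.mk dimensions) nd xpath)
      = (fun nd xpath =>
          match pvResolve (PySem.Dict.mk dimensions) xpath.toList with
          | some v => nd.insert xpath v
          | none => nd) := by
    funext nd xpath
    exact pv_step_eq (PySem.Dict.mk dimensions) nd xpath
  rw [hstep]
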